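-- pv_equiv track=rewrite | github.com/3seasonal/adventofcode | 2025/day06/06_puzzle.py | convert_line_to_list
-- ===== SOURCE A (Python) =====
-- from typing import List
--
-- def convert_line_to_list(line: str, split_points: List[int], remove_chars:int=1 ) -> list[str]:
--     """
--     Convert a line of text into a list of strings, splitting based on given split points.
--     chars before split points are removed based on the remove_chars parameter.
--
--     Args:
--         line (str): The line of text to convert.
--         split_points (List[int]): List of indices to split the line.
--         remove_chars (int): Number of characters to remove before each split point.
--     """
--     returned_list = []
--     start=0
--     for point in split_points:
--
--         # handle base case:
--         if not point == 0:
--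
--             returned_list.append(line[start:point-remove_chars])
--             start = point-remove_chars
--     if start < len(line):
--         returned_list.append(line[start:])
--     #print (returned_list)
--     return returned_list
-- ===== SOURCE B (Python) =====
-- def convert_line_to_list(line: str, split_points, remove_chars: int = 1) -> list:
--     # Build the output back-to-front: emit the tail piece first, then walk the
--     # cut positions right-to-left emitting each segment, and reverse at the end.
--     cuts = [p - remove_chars for p in split_points if p != 0]
--     last = cuts[-1] if cuts else 0
--     out = [line[last:]] if last < len(line) else []
--     for i in range(len(cuts) - 1, -1, -1):
--         left = cuts[i - 1] if i > 0 else 0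
--         out.append(line[left:cuts[i]])
--     out.reverse()
--     return out
-- ===== Notes on version B (the rewrite author's own statement) =====
-- stated objective: alternative
-- what changed: B builds the result back-to-front: it computes the cut list once, emits the tail slice first, then iterates over cut indices in descending order emitting each segment right-to-left, and reverses the accumulated list, instead of A's forward loop mutating a running start.
import Mathlib
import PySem

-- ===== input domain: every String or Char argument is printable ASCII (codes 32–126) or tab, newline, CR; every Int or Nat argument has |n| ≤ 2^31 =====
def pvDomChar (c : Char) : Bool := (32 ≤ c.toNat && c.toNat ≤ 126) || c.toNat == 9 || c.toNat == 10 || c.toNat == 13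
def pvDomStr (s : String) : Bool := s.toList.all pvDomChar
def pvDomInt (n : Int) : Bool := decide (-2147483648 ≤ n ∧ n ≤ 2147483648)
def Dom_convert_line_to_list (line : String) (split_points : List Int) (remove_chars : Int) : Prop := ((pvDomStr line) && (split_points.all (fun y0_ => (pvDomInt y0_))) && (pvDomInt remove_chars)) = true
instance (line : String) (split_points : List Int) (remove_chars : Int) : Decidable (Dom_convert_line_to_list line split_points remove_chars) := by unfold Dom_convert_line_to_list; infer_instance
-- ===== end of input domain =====

-- B builds the output back-to-front (tail slice first, then a descending loop over the cut list, then a final reverse) instead of A's forward loop with a running start; same cost, different traversal order.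


-- ===== PORT A =====
-- A: one loop over split_points keeping (returned_list, start); append slice and move start at each nonzero point; tail slice if start < len(line).
def convert_line_to_list (line : String) (split_points : List Int) (remove_chars : Int) : List String :=
  let st := split_points.foldl
    (fun (st : List String × Int) point =>
      if ¬ (point = 0) then
        (st.1 ++ [PySem.Str.slice line (some st.2) (some (point - remove_chars))], point - remove_chars)
      else st)
    ([], 0)
  if st.2 < PySem.Str.len line then st.1 ++ [PySem.Str.slice line (some st.2) none] else st.1

-- ===== PORT B =====
-- B: cuts computed once; tail slice emitted first ('cuts[-1] if cuts else 0' ported as getLastD 0);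
-- then for i in range(len(cuts)-1, -1, -1) append line[left:cuts[i]] (in-range indexing ported with pyGetD); finally reverse.
def convert_line_to_list_alt (line : String) (split_points : List Int) (remove_chars : Int) : List String :=
  let cuts : List Int := (split_points.filter (fun p => p ≠ 0)).map (fun p => p - remove_chars)
  let last : Int := cuts.getLastD 0
  let out0 : List String := if last < PySem.Str.len line then [PySem.Str.slice line (some last) none] else []
  let out := (PySem.List.pyRange ((cuts.length : Int) - 1) (-1) (-1)).foldl
    (fun acc i =>
      acc ++ [PySem.Str.slice line
        (some (if 0 < i then PySem.List.pyGetD cuts (i - 1) 0 else 0))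
        (some (PySem.List.pyGetD cuts i 0))])
    out0
  out.reverse

-- ===== PRECONDITION & SPEC =====
def Spec_convert_line_to_list (line : String) (split_points : List Int) (remove_chars : Int) (out : List String) : Prop := out = convert_line_to_list_alt line split_points remove_chars
instance (line : String) (split_points : List Int) (remove_chars : Int) (out : List String) : Decidable (Spec_convert_line_to_list line split_points remove_chars out) := by unfold Spec_convert_line_to_list; infer_instance

-- ===== CLAIM (what is proved, stated in full; the proofs are below) =====
def Claim_equal_convert_line_to_list : Prop := ∀ (line : String) (split_points : List Int) (remove_chars : Int), Dom_convert_line_to_list line split_points remove_chars → Spec_convert_line_to_list line split_points remove_chars (convert_line_to_list line split_points remove_chars)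

-- ===== LEMMAS AND PROOFS =====

-- last element of a boundary list, seeded with the current start (proof-side helper)
def pvLast (d : Int) : List Int → Int
  | [] => d
  | x :: xs => pvLast x xs

theorem pvLast_eq_getLastD (l : List Int) : ∀ (a d : Int), (a :: l).getLastD d = pvLast a l := by
  induction l with
  | nil => intro a d; rfl
  | cons x xs ih =>
    intro a d
    rw [List.getLastD_cons, ih x a]
    rfl

-- A's loop, run from state (acc, start), equals acc ++ (slices over consecutive pairs of
-- the boundary list start :: cuts), paired with the last boundary.
theorem pv_loop_eq (line : String) (remove_chars : Int) :
    ∀ (ps : List Int) (start : Int) (acc : List String),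
      ps.foldl
        (fun (st : List String × Int) point =>
          if ¬ (point = 0) then
            (st.1 ++ [PySem.Str.slice line (some st.2) (some (point - remove_chars))], point - remove_chars)
          else st)
        (acc, start)
      = (acc ++ (((start :: (ps.filter (fun p => p ≠ 0)).map (fun p => p - remove_chars)).zip
                    ((ps.filter (fun p => p ≠ 0)).map (fun p => p - remove_chars))).map
                  (fun ab => PySem.Str.slice line (some ab.1) (some ab.2))),
         pvLast start ((ps.filter (fun p => p ≠ 0)).map (fun p => p - remove_chars))) := by
  intro ps
  induction ps with
  | nil => intro start acc; simp [pvLast]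
  | cons p ps ih =>
    intro start acc
    rw [List.foldl_cons]
    by_cases hp : p = 0
    · rw [if_neg (by simp [hp]), List.filter_cons_of_neg (by simp [hp])]
      exact ih start acc
    · rw [if_pos hp, List.filter_cons_of_pos (by simp [hp]), List.map_cons, ih]
      simp only [Prod.mk.injEq]
      refine ⟨?_, rfl⟩
      rw [List.zip_cons_cons, List.map_cons, List.append_assoc, List.singleton_append]

-- the pairwise-zip slices, written as a map over positions (left boundary indexed in a :: c)
theorem zip_map_eq_range_map (f : Int → Int → String) :
    ∀ (c : List Int) (a : Int),
      ((a :: c).zip c).map (fun ab => f ab.1 ab.2)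
        = (List.range c.length).map (fun k => f ((a :: c).getD k 0) (c.getD k 0)) := by
  intro c
  induction c with
  | nil => intro a; rfl
  | cons x xs ih =>
    intro a
    rw [List.zip_cons_cons, List.map_cons, List.length_cons, List.range_succ_eq_map, List.map_cons,
        List.map_map, ih x]
    simp [Function.comp]

-- B's descending loop followed by the final reverse yields the ascending map plus the tail piece.
theorem alt_eq_range_map (line : String) (split_points : List Int) (remove_chars : Int) :
    convert_line_to_list_alt line split_points remove_chars
      = (List.range ((split_points.filter (fun p => p ≠ 0)).map (fun p => p - remove_chars)).length).map
          (fun k =>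
            PySem.Str.slice line
              (some ((0 :: (split_points.filter (fun p => p ≠ 0)).map (fun p => p - remove_chars)).getD k 0))
              (some (((split_points.filter (fun p => p ≠ 0)).map (fun p => p - remove_chars)).getD k 0)))
        ++ (if ((split_points.filter (fun p => p ≠ 0)).map (fun p => p - remove_chars)).getLastD 0 < PySem.Str.len line
            then [PySem.Str.slice line (some (((split_points.filter (fun p => p ≠ 0)).map (fun p => p - remove_chars)).getLastD 0)) none]
            else []) := by
  unfold convert_line_to_list_alt
  set cuts := (split_points.filter (fun p => p ≠ 0)).map (fun p => p - remove_chars) with hcuts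
  simp only []
  have hrange : PySem.List.pyRange ((cuts.length : Int) - 1) (-1) (-1)
      = (PySem.List.pyRange 0 (cuts.length : Int) 1).reverse := by
    have := PySem.List.pyRange_neg_one_eq_reverse ((cuts.length : Int) - 1) (-1)
    simpa using this
  rw [PySem.List.foldl_append_singleton_eq_map, hrange, List.map_reverse, List.reverse_append,
      List.reverse_reverse]
  congr 1
  · -- the ascending map over pyRange equals the map over List.range with getD boundaries
    rw [PySem.List.pyRange_one]
    simp only [Int.sub_zero, Int.toNat_natCast, List.map_map]
    apply List.map_congr_left
    intro k hk
    rw [List.mem_range] at hk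
    simp only [Function.comp, Int.zero_add]
    by_cases h0 : k = 0
    · subst h0; simp [PySem.List.pyGetD_zero]
    · have hk1 : 0 < (k : Int) := by exact_mod_cast Nat.pos_of_ne_zero h0
      rw [if_pos hk1]
      have h1 : (k : Int) - 1 = ((k - 1 : Nat) : Int) := by omega
      rw [h1, PySem.List.pyGetD_natCast, PySem.List.pyGetD_natCast]
      have : (0 :: cuts).getD k 0 = cuts.getD (k - 1) 0 := by
        cases k with
        | zero => exact absurd rfl h0
        | succ m => simp
      rw [this]
  · -- the tail piece: reversing a nil-or-singleton list leaves it unchanged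
    split_ifs <;> simp

theorem convert_eq (line : String) (split_points : List Int) (remove_chars : Int) :
    convert_line_to_list line split_points remove_chars
      = convert_line_to_list_alt line split_points remove_chars := by
  unfold convert_line_to_list
  rw [pv_loop_eq, alt_eq_range_map]
  simp only [List.nil_append]
  rw [zip_map_eq_range_map (fun a b => PySem.Str.slice line (some a) (some b))
        ((split_points.filter (fun p => p ≠ 0)).map (fun p => p - remove_chars)) 0,
      show pvLast 0 ((split_points.filter (fun p => p ≠ 0)).map (fun p => p - remove_chars))
        = ((split_points.filter (fun p => p ≠ 0)).map (fun p => p - remove_chars)).getLastD 0 from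
        by rw [← pvLast_eq_getLastD _ 0 0, List.getLastD_cons]]
  split_ifs <;> simp

-- ===== VERDICT (by name: the statement is the Claim_ definition above) =====
theorem convert_line_to_list_spec : Claim_equal_convert_line_to_list := by
  intro line sp r _
  unfold Spec_convert_line_to_list
  exact convert_eq line sp r
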